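-- pv_equiv track=rewrite | github.com/atopile/atopile | src/faebryk/exporters/pcb/rules/export.py | _kicad_cu_layer_names
-- ===== SOURCE A (Python) =====
-- def _kicad_cu_layer_names(num_coppers: int) -> list[str]:
--     if num_coppers <= 0:
--         return []
--     if num_coppers == 1:
--         return ["F.Cu"]
--     names: list[str] = ["F.Cu"]
--     for i in range(1, num_coppers - 1):
--         names.append(f"In{i}.Cu")
--     names.append("B.Cu")
--     return names
-- ===== SOURCE B (Python) =====
-- def _kicad_cu_layer_names(num_coppers: int) -> list[str]:
--     # Build the layer list back-to-front, then reverse once at the end.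
--     if num_coppers <= 0:
--         return []
--     rev = ["B.Cu" if num_coppers > 1 else "F.Cu"]
--     i = num_coppers - 2
--     while i >= 1:
--         rev.append(f"In{i}.Cu")
--         i -= 1
--     if num_coppers > 1:
--         rev.append("F.Cu")
--     rev.reverse()
--     return rev
-- ===== Notes on version B (the rewrite author's own statement) =====
-- stated objective: alternative
-- what changed: Replaces the guard chain plus forward prefix/loop/suffix construction with a back-to-front build: start from the bottom layer, count the inner indices DOWN in a while loop, append the top layer, and reverse the accumulated list once at the end.
import Mathlib
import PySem

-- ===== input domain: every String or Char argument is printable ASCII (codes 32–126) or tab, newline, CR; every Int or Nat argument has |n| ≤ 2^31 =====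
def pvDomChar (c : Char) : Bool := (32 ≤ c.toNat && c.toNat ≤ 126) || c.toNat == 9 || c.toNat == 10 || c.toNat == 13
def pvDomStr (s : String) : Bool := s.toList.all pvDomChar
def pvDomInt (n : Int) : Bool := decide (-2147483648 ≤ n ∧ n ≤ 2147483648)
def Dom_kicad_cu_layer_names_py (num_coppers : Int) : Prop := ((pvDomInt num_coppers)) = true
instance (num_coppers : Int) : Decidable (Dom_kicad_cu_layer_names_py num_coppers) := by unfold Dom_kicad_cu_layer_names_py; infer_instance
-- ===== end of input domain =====

-- B builds the layer list back-to-front (countdown while loop) and reverses once at the end; same cost, different traversal order.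

-- ===== PORT A =====
def kicad_cu_layer_names_py (num_coppers : Int) : List String :=
  if num_coppers ≤ 0 then []
  else if num_coppers = 1 then ["F.Cu"]
  else
    ((PySem.List.pyRange 1 (num_coppers - 1) 1).foldl
      (fun names i => names ++ ["In" ++ PySem.Int.toStr i ++ ".Cu"]) ["F.Cu"]) ++ ["B.Cu"]

-- ===== PORT B =====
-- the countdown while loop of Source B: appends "In{i}.Cu" for i, i-1, …, 1
def pvBLoop (i : Int) (acc : List String) : List String :=
  if h : 1 ≤ i then pvBLoop (i - 1) (acc ++ ["In" ++ PySem.Int.toStr i ++ ".Cu"]) else acc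
termination_by i.toNat
decreasing_by omega

def kicad_cu_layer_names_py_alt (num_coppers : Int) : List String :=
  if num_coppers ≤ 0 then []
  else
    let rev0 : List String := [if 1 < num_coppers then "B.Cu" else "F.Cu"]
    let rev1 := pvBLoop (num_coppers - 2) rev0
    let rev2 := if 1 < num_coppers then rev1 ++ ["F.Cu"] else rev1
    rev2.reverse

-- ===== PRECONDITION & SPEC =====
def Spec_kicad_cu_layer_names_py (num_coppers : Int) (out : List String) : Prop := out = kicad_cu_layer_names_py_alt num_coppers
instance (num_coppers : Int) (out : List String) : Decidable (Spec_kicad_cu_layer_names_py num_coppers out) := by unfold Spec_kicad_cu_layer_names_py; infer_instance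

-- ===== CLAIM (what is proved, stated in full; the proofs are below) =====
def Claim_equal_kicad_cu_layer_names_py : Prop := ∀ (num_coppers : Int), Dom_kicad_cu_layer_names_py num_coppers → Spec_kicad_cu_layer_names_py num_coppers (kicad_cu_layer_names_py num_coppers)

-- ===== LEMMAS AND PROOFS =====

theorem foldl_append_singleton (f : Int → String) (l : List Int) (init : List String) :
    l.foldl (fun names i => names ++ [f i]) init = init ++ l.map f := by
  induction l generalizing init with
  | nil => simp
  | cons x xs ih => simp [List.foldl_cons, ih]

-- the countdown loop produces the In-names of 1..i in reverse, appended to acc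
theorem pvBLoop_eq (i : Int) (acc : List String) :
    pvBLoop i acc
      = acc ++ ((PySem.List.pyRange 1 (i + 1) 1).map
          (fun j => "In" ++ PySem.Int.toStr j ++ ".Cu")).reverse := by
  by_cases h : 1 ≤ i
  · rw [pvBLoop, dif_pos h]
    rw [pvBLoop_eq (i - 1)]
    have hsplit : PySem.List.pyRange 1 (i + 1) 1
        = PySem.List.pyRange 1 i 1 ++ PySem.List.pyRange i (i + 1) 1 :=
      PySem.List.pyRange_one_append 1 i (i + 1) (by omega) (by omega)
    have hsing : PySem.List.pyRange i (i + 1) 1 = [i] :=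
      PySem.List.pyRange_one_singleton i
    rw [hsplit, hsing]
    simp [show i - 1 + 1 = i by omega]
  · rw [pvBLoop, dif_neg h]
    rw [PySem.List.pyRange_one_eq_nil (by omega)]
    simp
termination_by i.toNat
decreasing_by omega

-- ===== VERDICT (by name: the statement is the Claim_ definition above) =====
theorem kicad_cu_layer_names_py_spec : Claim_equal_kicad_cu_layer_names_py := by
  intro n _
  show kicad_cu_layer_names_py n = kicad_cu_layer_names_py_alt n
  unfold kicad_cu_layer_names_py kicad_cu_layer_names_py_alt
  by_cases h0 : n ≤ 0
  · simp [h0]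
  · by_cases h1 : n = 1
    · subst h1
      have h : pvBLoop (-1) ["F.Cu"] = ["F.Cu"] := by
        rw [pvBLoop_eq, PySem.List.pyRange_one_eq_nil (by norm_num)]
        simp
      simp [h]
    · have h2 : 2 ≤ n := by omega
      simp only [if_neg h0, if_neg h1, if_pos (by omega : (1:Int) < n)]
      rw [foldl_append_singleton, pvBLoop_eq]
      rw [show n - 2 + 1 = n - 1 by omega]
      simp
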